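-- pv_equiv track=rewrite | github.com/chacham/learn-algorithm | codejam/2019-1A/AlienRhyme/solve.py | solve
-- ===== SOURCE A (Python) =====
-- COUNT = 'COUNT'
--
-- END = 'END'
--
-- def solve(N, S):
--     trie = { COUNT: 0 }
--     for s in S:
--         nowTrie = trie
--         for c in reversed(s):
--             if c not in nowTrie:
--                 nowTrie[c] = { COUNT: 0 }
--             nowTrie[COUNT] += 1
--             nowTrie = nowTrie[c]
--         nowTrie[COUNT] += 1
--         nowTrie[END] = True
--     def helper(trie):
--         res = 0
--         for k in trie:
--             if k in [END, COUNT]: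
--                 continue
--             if trie[k][COUNT] >= 2:
--                 res += helper(trie[k])
--         if trie[COUNT] - res >= 2:
--             res += 2
--         return res
--
--     res = 0
--     for k in trie:
--         if k in [END, COUNT]:
--             continue
--         res += helper(trie[k])
--     return res
-- ===== SOURCE B (Python) =====
-- def _pairs(rest):
--     # Sum of pair-counts over the child groups of one trie node. `rest` holds
--     # the remaining suffixes; empty suffixes end at this node and never pair
--     # deeper, so they are skipped; otherwise peel off the group sharing the
--     # first suffix's leading character, recurse on its tails, and repeat.
--     if not rest:
--         return 0
--     if not rest[0]:
--         return _pairs(rest[1:])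
--     c = rest[0][0]
--     group = [s[1:] for s in rest if s[:1] == c]
--     return _node(group) + _pairs([s for s in rest if s[:1] != c])
--
-- def _node(sub):
--     # Pair-count of the node whose remaining suffixes are `sub`;
--     # at most one new pair per node.
--     res = _pairs(sub)
--     return res + 2 if len(sub) - res >= 2 else res
--
-- def solve(N, S):
--     return _pairs([w[::-1] for w in S])
-- ===== Notes on version B (the rewrite author's own statement) =====
-- stated objective: simpler
-- what changed: Replaces the two-phase nested-dict suffix trie (build COUNT/END nodes, then traverse) by one recursive partition refinement over the lists of reversed words: group nonempty suffixes by leading character, recurse on their tails, and add 2 per node when at least two suffixes remain unmatched, with no pairing at the root.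
import Mathlib
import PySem

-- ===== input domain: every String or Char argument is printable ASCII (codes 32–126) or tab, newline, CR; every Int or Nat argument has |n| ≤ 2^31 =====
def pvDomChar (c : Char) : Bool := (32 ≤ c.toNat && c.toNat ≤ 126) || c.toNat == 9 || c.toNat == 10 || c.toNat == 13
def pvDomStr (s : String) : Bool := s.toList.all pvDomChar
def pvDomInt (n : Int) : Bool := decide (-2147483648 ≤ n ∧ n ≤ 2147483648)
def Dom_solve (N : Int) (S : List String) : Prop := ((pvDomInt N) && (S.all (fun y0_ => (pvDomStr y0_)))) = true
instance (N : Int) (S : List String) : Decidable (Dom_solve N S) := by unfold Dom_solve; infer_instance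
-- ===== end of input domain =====

-- B replaces A's explicit nested-dict suffix trie (build, then traverse) by one
-- recursive partition refinement over the reversed words; objective: simpler.


-- ===== PORT A =====
-- A's trie is a Python dict whose keys are the sentinels COUNT/END plus single
-- characters; it is ported as a node record (count, end flag) plus the list of
-- char-keyed children in insertion order (exactly the dict's iteration order
-- once COUNT/END are skipped, as A's loops do).
mutual
inductive ATrie where
  | mk : Int → Bool → AKids → ATrie
inductive AKids where
  | nil : AKids
  | cons : Char → ATrie → AKids → AKids
end

def aCount : ATrie → Int
  | .mk c _ _ => c

def aKids : ATrie → AKids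
  | .mk _ _ k => k

-- 'nowTrie[c]' lookup
def kidsGet? : AKids → Char → Option ATrie
  | .nil, _ => none
  | .cons c' t k, c => if c' = c then some t else kidsGet? k c

-- 'nowTrie[c] = …' : overwrite in place, else append (dict insertion order)
def kidsSet : AKids → Char → ATrie → AKids
  | .nil, c, t => .cons c t .nil
  | .cons c' t' k, c, t => if c' = c then .cons c' t k else .cons c' t' (kidsSet k c t)

-- the inner 'for c in reversed(s)' pointer walk, as recursion on the char list
def insertA : ATrie → List Char → ATrie
  | .mk cnt e k, [] => .mk (cnt + 1) true k
  | .mk cnt e k, c :: cs =>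
      let child := match kidsGet? k c with
        | some t => t
        | none => .mk 0 false .nil
      .mk (cnt + 1) e (kidsSet k c (insertA child cs))

-- 'for s in S: …' building loop
def buildA (S : List String) : ATrie :=
  S.foldl (fun t s => insertA t s.toList.reverse) (.mk 0 false .nil)

-- 'def helper(trie)' and its 'for k in trie' child loop (COUNT/END skipped)
mutual
def helperA : ATrie → Int
  | .mk cnt _ k =>
      let res := kidsResA k
      if cnt - res ≥ 2 then res + 2 else res
def kidsResA : AKids → Int
  | .nil => 0
  | .cons _ t k => (if aCount t ≥ 2 then helperA t else 0) + kidsResA k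
end

-- the final top-level loop: helper on every child, no COUNT>=2 guard, no +2
def topResA : AKids → Int
  | .nil => 0
  | .cons _ t k => helperA t + topResA k

def solve (N : Int) (S : List String) : Int :=
  topResA (aKids (buildA S))

-- ===== PORT B =====
-- size measure and bounds used only for termination of the mutual recursion below
def bSize (ws : List (List Char)) : Nat :=
  (ws.map (fun w => w.length + 1)).sum

theorem bSize_filter_le (p : List Char → Bool) (ws : List (List Char)) :
    bSize (ws.filter p) ≤ bSize ws := by
  induction ws with
  | nil => simp [bSize]
  | cons w t ih =>
      simp only [List.filter_cons]
      split
      · simp only [bSize, List.map_cons, List.sum_cons] at *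
        omega
      · simp only [bSize, List.map_cons, List.sum_cons] at *
        omega

theorem bSize_map_tail_le (ws : List (List Char)) :
    bSize (ws.map List.tail) ≤ bSize ws := by
  induction ws with
  | nil => simp [bSize]
  | cons w t ih =>
      simp only [bSize, List.map_cons, List.sum_cons] at *
      have := w.length_tail
      omega

mutual
-- _pairs(rest) of Source B (s[:1] == c tests the head character: s.head? = some c)
def pairsB : List (List Char) → Int
  | [] => 0
  | [] :: rest => pairsB rest
  | (c :: cs) :: rest =>
      nodeB ((((c :: cs) :: rest).filter (fun s => s.head? = some c)).map List.tail)
        + pairsB (((c :: cs) :: rest).filter (fun s => ¬ s.head? = some c))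
termination_by ws => (bSize ws, 0)
decreasing_by
  · refine Prod.Lex.left _ _ ?_
    simp only [bSize, List.map_cons, List.sum_cons]
    omega
  · refine Prod.Lex.left _ _ ?_
    rw [List.filter_cons, if_pos (by simp)]
    have h1 := bSize_map_tail_le (rest.filter (fun s => decide (s.head? = some c)))
    have h2 := bSize_filter_le (fun s => decide (s.head? = some c)) rest
    simp only [bSize, List.map_cons, List.sum_cons, List.tail_cons, List.length_cons] at *
    omega
  · refine Prod.Lex.left _ _ ?_
    rw [List.filter_cons, if_neg (by simp)]
    have h2 := bSize_filter_le (fun s => decide (¬ s.head? = some c)) rest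
    simp only [bSize, List.map_cons, List.sum_cons] at *
    omega
-- _node(sub) of Source B
def nodeB (sub : List (List Char)) : Int :=
  let res := pairsB sub
  if (sub.length : Int) - res ≥ 2 then res + 2 else res
termination_by (bSize sub, 1)
decreasing_by
  exact Prod.Lex.right _ (by omega)
end

def solve_alt (N : Int) (S : List String) : Int :=
  pairsB (S.map (fun w => w.toList.reverse))

-- ===== PRECONDITION & SPEC =====
def Spec_solve (N : Int) (S : List String) (out : Int) : Prop := out = solve_alt N S
instance (N : Int) (S : List String) (out : Int) : Decidable (Spec_solve N S out) := by unfold Spec_solve; infer_instance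

-- ===== CLAIM (what is proved, stated in full; the proofs are below) =====
def Claim_equal_solve : Prop := ∀ (N : Int) (S : List String), Dom_solve N S → Spec_solve N S (solve N S)

-- ===== LEMMAS AND PROOFS =====

-- pairsB ignores empty suffixes wherever they sit in the list
theorem pairsB_filter : ∀ ws : List (List Char),
    pairsB (ws.filter (fun s => ¬ s = [])) = pairsB ws
  | [] => by simp [pairsB]
  | [] :: rest => by
      rw [List.filter_cons, if_neg (by simp)]
      rw [show pairsB ([] :: rest) = pairsB rest from by simp [pairsB]]
      exact pairsB_filter rest
  | (c :: cs) :: rest => by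
      have hfg : ∀ p : List Char → Bool, p [] = false →
          ∀ xs : List (List Char),
            (xs.filter (fun s => ¬ s = [])).filter p = xs.filter p := by
        intro p hp xs
        induction xs with
        | nil => rfl
        | cons x t ih =>
            by_cases hx : x = []
            · subst hx
              rw [List.filter_cons, if_neg (by simp), List.filter_cons, if_neg (by simp [hp]), ih]
            · rw [List.filter_cons, if_pos (by simpa using hx), List.filter_cons, List.filter_cons]
              split
              · rw [ih]
              · exact ih
      rw [List.filter_cons, if_pos (by simp)]
      rw [show pairsB ((c :: cs) :: rest.filter (fun s => ¬ s = [])) =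
          nodeB ((((c :: cs) :: rest.filter (fun s => ¬ s = [])).filter
              (fun s => s.head? = some c)).map List.tail)
            + pairsB (((c :: cs) :: rest.filter (fun s => ¬ s = [])).filter
              (fun s => ¬ s.head? = some c)) from by simp [pairsB]]
      rw [show pairsB ((c :: cs) :: rest) =
          nodeB ((((c :: cs) :: rest).filter (fun s => s.head? = some c)).map List.tail)
            + pairsB (((c :: cs) :: rest).filter (fun s => ¬ s.head? = some c)) from by
        simp [pairsB]]
      congr 1
      · congr 2
        rw [List.filter_cons, if_pos (by simp), List.filter_cons, if_pos (by simp)]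
        congr 1
        exact hfg (fun s => decide (s.head? = some c)) (by simp) rest
      · rw [List.filter_cons, if_neg (by simp), List.filter_cons, if_neg (by simp)]
        have hcomm : (rest.filter (fun s => decide (¬ s.head? = some c))).filter
              (fun s => ¬ s = []) =
            (rest.filter (fun s => ¬ s = [])).filter
              (fun s => decide (¬ s.head? = some c)) := by
          rw [List.filter_filter, List.filter_filter]
          congr 1
          funext s
          exact Bool.and_comm _ _
        rw [← hcomm]
        exact pairsB_filter (rest.filter (fun s => decide (¬ s.head? = some c)))
termination_by ws => bSize ws
decreasing_by
  · simp only [bSize, List.map_cons, List.sum_cons]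
    omega
  · have := bSize_filter_le (fun s => decide (¬ s.head? = some c)) rest
    simp only [bSize, List.map_cons, List.sum_cons] at *
    omega

-- "trie node t models suffix list L": its COUNT is L's length and its children,
-- in insertion order, model the partition of L's nonempty members by head char
-- (first-occurrence order), each child modelling the tails of its group.
mutual
def TM : ATrie → List (List Char) → Prop
  | .mk cnt _ k, L => cnt = (L.length : Int) ∧ KM k (L.filter (fun s => ¬ s = []))
def KM : AKids → List (List Char) → Prop
  | .nil, ws => ws = []
  | .cons c t k, ws =>
      (∃ w0 wr, ws = w0 :: wr ∧ w0.head? = some c) ∧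
      TM t ((ws.filter (fun s => s.head? = some c)).map List.tail) ∧
      KM k (ws.filter (fun s => ¬ s.head? = some c))
end

theorem TM_nil : TM (.mk 0 false .nil) [] := by
  simp [TM, KM]

theorem KM_set (c : Char) (cs : List Char)
    (hIH : ∀ t L, TM t L → TM (insertA t cs) (L ++ [cs])) :
    ∀ (k : AKids) (ws : List (List Char)), KM k ws →
    KM (kidsSet k c (insertA (match kidsGet? k c with
        | some t => t | none => .mk 0 false .nil) cs)) (ws ++ [c :: cs])
  | .nil, ws, hk => by
      simp only [KM] at hk; subst hk
      have h0 := hIH _ _ TM_nil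
      simp only [kidsGet?, kidsSet, KM]
      refine ⟨⟨c :: cs, [], by simp⟩, ?_, ?_⟩
      · simpa using h0
      · simp
  | .cons c' t k, ws, hk => by
      obtain ⟨⟨w0, wr, rfl, hw0⟩, hT, hK⟩ := hk
      by_cases hcc : c' = c
      · subst hcc
        simp only [kidsGet?, kidsSet, KM]
        refine ⟨⟨w0, wr ++ [c' :: cs], by simp, hw0⟩, ?_, ?_⟩
        · rw [List.filter_append, List.map_append]
          have hone : (([c' :: cs] : List (List Char)).filter
              (fun s => s.head? = some c')) = [c' :: cs] := by simp
          rw [hone]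
          have h1 := hIH _ _ hT
          simpa using h1
        · rw [List.filter_append]
          have hzero : (([c' :: cs] : List (List Char)).filter
              (fun s => ¬ s.head? = some c')) = [] := by simp
          rw [hzero, List.append_nil]
          exact hK
      · simp only [kidsGet?, if_neg hcc, kidsSet, KM]
        refine ⟨⟨w0, wr ++ [c :: cs], by simp, hw0⟩, ?_, ?_⟩
        · rw [List.filter_append]
          have hzero : (([c :: cs] : List (List Char)).filter
              (fun s => s.head? = some c')) = [] := by simp [Ne.symm hcc]
          rw [hzero, List.append_nil]
          exact hT
        · rw [List.filter_append]
          have hone : (([c :: cs] : List (List Char)).filter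
              (fun s => ¬ s.head? = some c')) = [c :: cs] := by simp [Ne.symm hcc]
          rw [hone]
          exact KM_set c cs hIH k _ hK

theorem TM_insert (cs : List Char) : ∀ t L, TM t L → TM (insertA t cs) (L ++ [cs]) := by
  induction cs with
  | nil =>
      rintro ⟨cnt, e, k⟩ L ⟨h1, h2⟩
      refine ⟨by simp [h1], ?_⟩
      simpa [List.filter_append] using h2
  | cons c cs ih =>
      rintro ⟨cnt, e, k⟩ L ⟨h1, h2⟩
      refine ⟨by simp [h1], ?_⟩
      have := KM_set c cs ih k _ h2
      simpa [List.filter_append] using this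

theorem TM_build (S : List String) :
    TM (buildA S) (S.map (fun w => w.toList.reverse)) := by
  have main : ∀ (S' : List String) (t : ATrie) (L : List (List Char)), TM t L →
      TM (S'.foldl (fun t s => insertA t s.toList.reverse) t)
         (L ++ S'.map (fun w => w.toList.reverse)) := by
    intro S'
    induction S' with
    | nil => intro t L h; simpa using h
    | cons s S' ih =>
        intro t L h
        have h1 := TM_insert s.toList.reverse t L h
        have h2 := ih _ _ h1
        simpa using h2
  simpa using main S _ [] TM_nil

theorem nodeB_single (w : List Char) : nodeB [w] = 0 := by
  induction w with
  | nil => simp [nodeB, pairsB]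
  | cons c cs ih =>
      rw [show nodeB [c :: cs] = (if ((1 : Int) - pairsB [c :: cs] ≥ 2)
          then pairsB [c :: cs] + 2 else pairsB [c :: cs]) from by simp [nodeB]]
      rw [show pairsB [(c :: cs)] = nodeB [cs] + pairsB [] from by simp [pairsB]]
      rw [show pairsB ([] : List (List Char)) = 0 from by simp [pairsB]]
      rw [ih]
      norm_num

-- mutual induction on the trie aligns A's traversal with B's recursion;
-- a child with COUNT 1 contributes 0 on both sides (nodeB_single)
mutual
theorem helperA_eq : ∀ (t : ATrie) (L : List (List Char)), TM t L → helperA t = nodeB L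
  | .mk cnt e k, L, ⟨h1, h2⟩ => by
      rw [show helperA (.mk cnt e k) = (if cnt - kidsResA k ≥ 2
          then kidsResA k + 2 else kidsResA k) from by simp [helperA]]
      rw [show nodeB L = (if ((L.length : Int) - pairsB L ≥ 2)
          then pairsB L + 2 else pairsB L) from by simp [nodeB]]
      rw [kidsResA_eq k _ h2, pairsB_filter, h1]
theorem kidsResA_eq : ∀ (k : AKids) (ws : List (List Char)), KM k ws → kidsResA k = pairsB ws
  | .nil, ws, hk => by
      simp only [KM] at hk; subst hk; simp [kidsResA, pairsB]
  | .cons c t k, ws, hk => by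
      obtain ⟨⟨w0, wr, rfl, hw0⟩, hT, hK⟩ := hk
      obtain ⟨cs0, rfl⟩ : ∃ cs0, w0 = c :: cs0 := by
        rcases w0 with _ | ⟨c0, cs0⟩
        · simp at hw0
        · simp at hw0; exact ⟨cs0, by rw [hw0]⟩
      rw [kidsResA]
      rw [show pairsB ((c :: cs0) :: wr) =
          nodeB ((((c :: cs0) :: wr).filter (fun s => s.head? = some c)).map List.tail)
            + pairsB (((c :: cs0) :: wr).filter (fun s => ¬ s.head? = some c))
        from by simp [pairsB]]
      rw [kidsResA_eq k _ hK]
      congr 1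
      set G := (((c :: cs0) :: wr).filter (fun s => s.head? = some c)).map List.tail with hG
      have hGlen : aCount t = (G.length : Int) := by
        match t, hT with
        | .mk cnt' e' k', ⟨hc, _⟩ => simpa [aCount] using hc
      by_cases hge : aCount t ≥ 2
      · rw [if_pos hge]; exact helperA_eq t _ hT
      · rw [if_neg hge]
        have hGne : G ≠ [] := by
          simp [hG]
        have hlen : G.length = 1 := by
          rcases hL : G with _ | ⟨g, _ | _⟩ <;> rw [hL] at hGlen hGne <;> simp_all
        obtain ⟨g, hGg⟩ : ∃ g, G = [g] := by
          rcases hL : G with _ | ⟨g, _ | _⟩ <;> simp_all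
        rw [hGg] at hT ⊢
        rw [nodeB_single]
end

theorem topResA_eq : ∀ (k : AKids) (ws : List (List Char)), KM k ws → topResA k = pairsB ws
  | .nil, ws, hk => by
      simp only [KM] at hk; subst hk; simp [topResA, pairsB]
  | .cons c t k, ws, hk => by
      obtain ⟨⟨w0, wr, rfl, hw0⟩, hT, hK⟩ := hk
      obtain ⟨cs0, rfl⟩ : ∃ cs0, w0 = c :: cs0 := by
        rcases w0 with _ | ⟨c0, cs0⟩
        · simp at hw0
        · simp at hw0; exact ⟨cs0, by rw [hw0]⟩
      rw [topResA]
      rw [show pairsB ((c :: cs0) :: wr) =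
          nodeB ((((c :: cs0) :: wr).filter (fun s => s.head? = some c)).map List.tail)
            + pairsB (((c :: cs0) :: wr).filter (fun s => ¬ s.head? = some c))
        from by simp [pairsB]]
      rw [topResA_eq k _ hK, helperA_eq t _ hT]

-- ===== VERDICT (by name: the statement is the Claim_ definition above) =====
theorem solve_spec : Claim_equal_solve := by
  intro N S _
  unfold Spec_solve solve solve_alt
  have h := TM_build S
  match hb : buildA S, h with
  | .mk cnt e k, ⟨_, hK⟩ =>
      rw [show aKids (.mk cnt e k) = k from rfl]
      rw [topResA_eq k _ hK, pairsB_filter]
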